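-- pv_equiv track=rewrite | github.com/yoshikipom/leetcode | solve/205.isomorphic-strings.py | numArray
-- ===== SOURCE A (Python) =====
-- def numArray(s):
--     done = {}
--     num_array = []
--     index = 0
--     for c in s:
--         if c in done:
--             num_array.append(done[c])
--         else:
--             num_array.append(index)
--             done[c] = index
--             index += 1
--     return num_array
-- ===== SOURCE B (Python) =====
-- def numArray(s):
--     # pass 1: distinct characters of s in first-occurrence order
--     order = []
--     for c in s:
--         if c not in order:
--             order.append(c)
--     # rank table: character -> its first-occurrence index
--     rank = {c: i for i, c in enumerate(order)}
--     # pass 2: map the string through the table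
--     return [rank[c] for c in s]
-- ===== Notes on version B (the rewrite author's own statement) =====
-- stated objective: alternative
-- what changed: B is two-phase: it first collects the distinct characters in first-occurrence order and builds a rank table from enumerate, then maps the whole string through that table, instead of A's single interleaved pass that assigns fresh indices on the fly while emitting.
import Mathlib
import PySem

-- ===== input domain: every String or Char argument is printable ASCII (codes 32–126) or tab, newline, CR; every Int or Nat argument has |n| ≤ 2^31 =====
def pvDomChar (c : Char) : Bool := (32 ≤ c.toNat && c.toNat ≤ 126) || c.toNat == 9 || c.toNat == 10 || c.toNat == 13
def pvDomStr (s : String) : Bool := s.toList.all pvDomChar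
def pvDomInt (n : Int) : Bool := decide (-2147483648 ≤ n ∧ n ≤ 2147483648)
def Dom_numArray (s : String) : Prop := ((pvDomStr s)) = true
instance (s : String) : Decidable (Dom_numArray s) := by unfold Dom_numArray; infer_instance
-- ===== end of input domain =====

-- B re-implements the canonicalization in two separate passes (collect first-occurrence order, build a
-- rank table, then map) instead of A's single interleaved pass; same cost, different decomposition.

-- ===== PORT A =====
-- the 'for c in s' loop with state (done, num_array, index)
def pvLoopA : List Char → PySem.Dict Char Int → List Int → Int → List Int
  | [], _, arr, _ => arr
  | c :: rest, done, arr, index =>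
    if done.contains c then
      pvLoopA rest done (arr ++ [done.getD c 0]) index
    else
      pvLoopA rest (done.insert c index) (arr ++ [index]) (index + 1)

def numArray (s : String) : List Int :=
  pvLoopA s.toList PySem.Dict.empty [] 0

-- ===== PORT B =====
-- pass 1: distinct characters in first-occurrence order
def pvOrder : List Char → List Char → List Char
  | [], o => o
  | c :: rest, o => if c ∈ o then pvOrder rest o else pvOrder rest (o ++ [c])

-- rank = {c: i for i, c in enumerate(order)}
def pvRank : List Char → Int → PySem.Dict Char Int → PySem.Dict Char Int
  | [], _, d => d
  | c :: rest, i, d => pvRank rest (i + 1) (d.insert c i)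

def numArray_alt (s : String) : List Int :=
  let order := pvOrder s.toList []
  let rank := pvRank order 0 PySem.Dict.empty
  s.toList.map (fun c => rank.getD c 0)

-- ===== PRECONDITION & SPEC =====
def Spec_numArray (s : String) (out : List Int) : Prop := out = numArray_alt s
instance (s : String) (out : List Int) : Decidable (Spec_numArray s out) := by unfold Spec_numArray; infer_instance

-- ===== CLAIM (what is proved, stated in full; the proofs are below) =====
def Claim_equal_numArray : Prop := ∀ (s : String), Dom_numArray s → Spec_numArray s (numArray s)

-- ===== LEMMAS AND PROOFS =====

-- pvOrder only appends to the accumulator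
lemma pvOrder_prefix (l : List Char) (o : List Char) : ∃ t, pvOrder l o = o ++ t := by
  induction l generalizing o with
  | nil => exact ⟨[], by simp [pvOrder]⟩
  | cons c rest ih =>
    simp only [pvOrder]
    by_cases hc : c ∈ o
    · rw [if_pos hc]; exact ih o
    · rw [if_neg hc]
      obtain ⟨t, ht⟩ := ih (o ++ [c])
      exact ⟨c :: t, by simp [ht]⟩

lemma append_singleton_nodup (o : List Char) (c : Char) (h : o.Nodup) (hc : c ∉ o) :
    (o ++ [c]).Nodup := by
  simp [List.nodup_append, h]
  intro a ha hac
  exact hc (hac ▸ ha)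

lemma pvOrder_nodup (l : List Char) (o : List Char) (h : o.Nodup) : (pvOrder l o).Nodup := by
  induction l generalizing o with
  | nil => exact h
  | cons c rest ih =>
    simp only [pvOrder]
    by_cases hc : c ∈ o
    · rw [if_pos hc]; exact ih o h
    · rw [if_neg hc]; exact ih _ (append_singleton_nodup o c h hc)

lemma mem_pvOrder_of_mem_acc {c : Char} (l : List Char) (o : List Char) (h : c ∈ o) :
    c ∈ pvOrder l o := by
  obtain ⟨t, ht⟩ := pvOrder_prefix l o
  rw [ht]; exact List.mem_append_left _ h

lemma idxOf_append_left {c : Char} (o t : List Char) (h : c ∈ o) :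
    (o ++ t).idxOf c = o.idxOf c := by
  induction o with
  | nil => simp at h
  | cons a rest ih =>
    by_cases hc : a = c
    · simp [hc]
    · have hcr : c ∈ rest := by
        rcases List.mem_cons.mp h with h' | h'
        · exact absurd h'.symm hc
        · exact h'
      simp [List.idxOf_cons, beq_eq_false_iff_ne.mpr hc, ih hcr]

lemma idxOf_append_right_self (o : List Char) (c : Char) (h : c ∉ o) :
    (o ++ [c]).idxOf c = o.length := by
  induction o with
  | nil => simp
  | cons a rest ih =>
    simp only [List.mem_cons, not_or] at h
    have hne : ¬ a = c := fun hh => h.1 hh.symm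
    simp [List.idxOf_cons, beq_eq_false_iff_ne.mpr hne, ih h.2]

-- lookup in the rank table built from a nodup list
lemma pvRank_getD (o : List Char) (c : Char) :
    ∀ (i : Int) (d : PySem.Dict Char Int), o.Nodup →
      (pvRank o i d).getD c 0 = if c ∈ o then i + (o.idxOf c : Int) else d.getD c 0 := by
  induction o with
  | nil => intro i d _; simp [pvRank]
  | cons a rest ih =>
    intro i d hnd
    simp only [pvRank]
    rw [ih (i + 1) (d.insert a i) (List.Nodup.of_cons hnd)]
    by_cases hc : c = a
    · subst hc
      have hcr : c ∉ rest := (List.nodup_cons.mp hnd).1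
      simp [hcr, PySem.Dict.getD_insert_self]
    · by_cases hm : c ∈ rest
      · have : (a :: rest).idxOf c = rest.idxOf c + 1 := by
          simp [List.idxOf_cons, beq_eq_false_iff_ne.mpr (fun hh => hc hh.symm)]
        simp only [hm, if_true, List.mem_cons, hc, false_or, this]
        push_cast
        ring
      · have hno : c ∉ a :: rest := by simp [hc, hm]
        simp [hm, hno, PySem.Dict.getD_insert_of_ne d _ _ hc]

-- main invariant of A's loop
lemma pvLoopA_spec (l : List Char) :
    ∀ (o : List Char) (done : PySem.Dict Char Int) (arr : List Int), o.Nodup →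
    (∀ x, done.contains x = decide (x ∈ o)) →
    (∀ x ∈ o, done.getD x 0 = (o.idxOf x : Int)) →
    pvLoopA l done arr (o.length : Int) =
      arr ++ l.map (fun c => ((pvOrder l o).idxOf c : Int)) := by
  induction l with
  | nil => intro o done arr _ _ _; simp [pvLoopA, pvOrder]
  | cons c rest ih =>
    intro o done arr hnd hcont hget
    simp only [pvLoopA, pvOrder, List.map_cons]
    by_cases hm : c ∈ o
    · rw [if_pos (by rw [hcont]; exact decide_eq_true hm), if_pos hm]
      rw [ih o done _ hnd hcont hget]
      obtain ⟨t, ht⟩ := pvOrder_prefix rest o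
      rw [hget c hm, ht, idxOf_append_left o t hm]
      simp
    · rw [if_neg (by rw [hcont]; simp [hm]), if_neg hm]
      have hnd' : (o ++ [c]).Nodup := append_singleton_nodup o c hnd hm
      have hcont' : ∀ x, (done.insert c (o.length : Int)).contains x = decide (x ∈ o ++ [c]) := by
        intro x
        rw [PySem.Dict.contains_insert, hcont]
        by_cases hx : x = c <;> simp [hx]
      have hget' : ∀ x ∈ o ++ [c],
          (done.insert c (o.length : Int)).getD x 0 = ((o ++ [c]).idxOf x : Int) := by
        intro x hx
        by_cases hxc : x = c
        · subst hxc
          rw [PySem.Dict.getD_insert_self, idxOf_append_right_self o x hm]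
        · have hxo : x ∈ o := by
            rcases List.mem_append.mp hx with h | h
            · exact h
            · simp at h; exact absurd h hxc
          rw [PySem.Dict.getD_insert_of_ne done _ _ hxc, hget x hxo,
            idxOf_append_left o [c] hxo]
      have hlen : (o.length : Int) + 1 = (((o ++ [c]).length : Nat) : Int) := by
        simp
      rw [hlen, ih (o ++ [c]) _ _ hnd' hcont' hget']
      obtain ⟨t, ht⟩ := pvOrder_prefix rest (o ++ [c])
      have hco : c ∈ o ++ [c] := by simp
      rw [ht, idxOf_append_left (o ++ [c]) t hco, idxOf_append_right_self o c hm]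
      simp

-- every character of l occurs in pvOrder l o
lemma mem_pvOrder_of_mem {c : Char} (l : List Char) (o : List Char) (h : c ∈ l) :
    c ∈ pvOrder l o := by
  induction l generalizing o with
  | nil => simp at h
  | cons a rest ih =>
    simp only [pvOrder]
    rcases List.mem_cons.mp h with h' | h'
    · subst h'
      by_cases hc : c ∈ o
      · rw [if_pos hc]; exact mem_pvOrder_of_mem_acc rest o hc
      · rw [if_neg hc]; exact mem_pvOrder_of_mem_acc rest (o ++ [c]) (by simp)
    · by_cases hc : a ∈ o
      · rw [if_pos hc]; exact ih _ h'
      · rw [if_neg hc]; exact ih _ h'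

-- ===== VERDICT (by name: the statement is the Claim_ definition above) =====
theorem numArray_spec : Claim_equal_numArray := by
  intro s _
  unfold Spec_numArray numArray numArray_alt
  have h := pvLoopA_spec s.toList [] PySem.Dict.empty [] (by simp)
    (by intro x; simp [PySem.Dict.contains_empty]) (by intro x hx; simp at hx)
  simp only [List.length_nil, Int.natCast_zero, List.nil_append] at h
  rw [h]
  apply List.map_congr_left
  intro c hc
  rw [pvRank_getD _ c 0 _ (pvOrder_nodup s.toList [] (by simp)),
    if_pos (mem_pvOrder_of_mem s.toList [] hc)]
  simp
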